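-- pv_equiv track=rewrite | github.com/MeetKai/functionary | functionary/train/training_utils.py | extract_unmasked_chunks
-- ===== SOURCE A (Python) =====
-- from typing import List
--
-- def extract_unmasked_chunks(labels: List[int], masked_value) -> List[List[int]]:
--     """This function is used to extract unmasked chunks of integer
--     For example, labels = [-100, -100, 1, 2, 3, -100, -100, 4, 5] --> chunks = [[1,2,3], [4,5]]
--     Args:
--         labels (List[int]): list of integer containing token_id and -100
--
--     Returns:
--         List[List[int]]: list of chunk, for example: [[1,2,3], [4,5]]
--     """
--     chunks = []
--     chunk = []
--     for token_id in labels: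
--         if token_id != masked_value:
--             chunk.append(token_id)
--         else:
--             if len(chunk) > 0:
--                 chunks.append(chunk)
--                 chunk = []
--     if len(chunk) > 0:
--         chunks.append(chunk)
--     return chunks
-- ===== SOURCE B (Python) =====
-- from itertools import groupby
--
-- def extract_unmasked_chunks(labels, masked_value):
--     return [list(g) for k, g in groupby(labels, key=lambda t: t != masked_value) if k]
-- ===== Notes on version B (the rewrite author's own statement) =====
-- stated objective: idiomatic
-- what changed: Replaced the manual chunk-accumulator state machine with itertools.groupby run-length grouping: keep the groups whose key (t != masked_value) is True.
import Mathlib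
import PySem

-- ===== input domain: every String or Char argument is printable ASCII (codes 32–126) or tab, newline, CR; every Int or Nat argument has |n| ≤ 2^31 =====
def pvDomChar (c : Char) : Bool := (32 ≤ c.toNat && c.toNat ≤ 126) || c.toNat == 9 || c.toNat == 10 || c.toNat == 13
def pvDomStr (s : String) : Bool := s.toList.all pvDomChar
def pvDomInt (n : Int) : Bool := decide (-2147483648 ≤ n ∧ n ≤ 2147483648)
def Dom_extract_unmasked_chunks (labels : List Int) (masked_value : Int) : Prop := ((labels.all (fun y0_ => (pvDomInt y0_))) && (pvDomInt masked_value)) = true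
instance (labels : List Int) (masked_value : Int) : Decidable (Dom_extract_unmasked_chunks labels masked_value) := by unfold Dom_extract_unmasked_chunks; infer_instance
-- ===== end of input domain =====

-- B replaces A's manual chunk-accumulator state machine by run-length grouping
-- (itertools.groupby on the key t != masked_value, keeping the key-True runs); same cost, more idiomatic.

-- ===== PORT A =====
-- state = (chunks, chunk); the loop body mirrors A's if/else, then the final flush.
def extract_unmasked_chunks (labels : List Int) (masked_value : Int) : List (List Int) :=
  let s := labels.foldl
    (fun (s : List (List Int) × List Int) token_id =>
      if token_id ≠ masked_value then (s.1, s.2 ++ [token_id])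
      else if s.2.length > 0 then (s.1 ++ [s.2], []) else (s.1, s.2))
    ([], [])
  if s.2.length > 0 then s.1 ++ [s.2] else s.1

-- ===== PORT B =====
-- groupby: peel off one maximal run of elements with the same key (t != masked_value) at a time,
-- keep the run when the key is True.
def pvGroups (masked_value : Int) : List Int → List (List Int)
  | [] => []
  | x :: xs =>
    let run := (x :: xs).takeWhile (fun t => ((t != masked_value) == (x != masked_value)))
    let rest := (x :: xs).dropWhile (fun t => ((t != masked_value) == (x != masked_value)))
    if x ≠ masked_value then run :: pvGroups masked_value rest
    else pvGroups masked_value rest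
  termination_by l => l.length
  decreasing_by
    all_goals
      simp only [List.dropWhile_cons, beq_self_eq_true, if_pos, ite_true]
      exact Nat.lt_succ_of_le (List.length_dropWhile_le _ _)

def extract_unmasked_chunks_alt (labels : List Int) (masked_value : Int) : List (List Int) :=
  pvGroups masked_value labels

-- ===== PRECONDITION & SPEC =====
def Spec_extract_unmasked_chunks (labels : List Int) (masked_value : Int) (out : List (List Int)) : Prop := out = extract_unmasked_chunks_alt labels masked_value
instance (labels : List Int) (masked_value : Int) (out : List (List Int)) : Decidable (Spec_extract_unmasked_chunks labels masked_value out) := by unfold Spec_extract_unmasked_chunks; infer_instance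

-- ===== CLAIM (what is proved, stated in full; the proofs are below) =====
def Claim_equal_extract_unmasked_chunks : Prop := ∀ (labels : List Int) (masked_value : Int), Dom_extract_unmasked_chunks labels masked_value → Spec_extract_unmasked_chunks labels masked_value (extract_unmasked_chunks labels masked_value)

-- ===== LEMMAS AND PROOFS =====

-- reference structural recursion with an explicit pending chunk
def pvRef (mv : Int) : List Int → List Int → List (List Int)
  | [], c => if c.length > 0 then [c] else []
  | t :: ts, c =>
    if t ≠ mv then pvRef mv ts (c ++ [t])
    else (if c.length > 0 then [c] else []) ++ pvRef mv ts []

theorem ref_step (mv : Int) (l : List Int) (cs : List (List Int)) (c : List Int) :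
    (let s := l.foldl
        (fun (s : List (List Int) × List Int) t =>
          if t ≠ mv then (s.1, s.2 ++ [t])
          else if s.2.length > 0 then (s.1 ++ [s.2], []) else (s.1, s.2))
        (cs, c)
      if s.2.length > 0 then s.1 ++ [s.2] else s.1) = cs ++ pvRef mv l c := by
  induction l generalizing cs c with
  | nil =>
    show (if c.length > 0 then cs ++ [c] else cs) = cs ++ pvRef mv [] c
    by_cases hc : c.length > 0 <;> simp [pvRef, hc]
  | cons t ts ih =>
    simp only [List.foldl_cons, pvRef]
    by_cases h : t ≠ mv
    · rw [if_pos h, if_pos h]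
      exact ih cs (c ++ [t])
    · simp only [h, if_neg, ite_false]
      by_cases hc : c.length > 0
      · simp only [hc, if_pos]
        rw [ih (cs ++ [c]) []]
        simp
      · have hc0 : c = [] := by
          cases c with
          | nil => rfl
          | cons a as => exact absurd (by simp) hc
        subst hc0
        simp only [hc, ite_false, if_neg, not_false_eq_true]
        rw [ih cs []]
        simp

theorem a_eq_ref (labels : List Int) (mv : Int) :
    extract_unmasked_chunks labels mv = pvRef mv labels [] := by
  have := ref_step mv labels [] []
  simpa [extract_unmasked_chunks] using this

-- pending chunk absorbs the leading unmasked run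
theorem ref_absorb (mv : Int) (l c : List Int) :
    pvRef mv l c = pvRef mv (l.dropWhile (fun t => t != mv)) (c ++ l.takeWhile (fun t => t != mv)) := by
  induction l generalizing c with
  | nil => simp
  | cons t ts ih =>
    by_cases h : t = mv
    · subst h
      simp [List.takeWhile_cons, List.dropWhile_cons]
    · have hp : (t != mv) = true := by simp [bne_iff_ne, h]
      simp only [List.takeWhile_cons, List.dropWhile_cons, hp, if_pos, ite_true, pvRef, ne_eq, h,
        not_false_eq_true]
      rw [ih (c ++ [t])]
      simp

-- skipping leading masked elements one at a time
theorem ref_skip (mv : Int) (l : List Int) :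
    pvRef mv (l.dropWhile (fun t => t == mv)) [] = pvRef mv l [] := by
  induction l with
  | nil => rfl
  | cons t ts ih =>
    by_cases h : t = mv
    · subst h
      simp only [List.dropWhile_cons, beq_self_eq_true, if_pos, ite_true]
      rw [ih]
      simp [pvRef]
    · simp [List.dropWhile_cons, h]

theorem b_eq_ref (mv : Int) (l : List Int) :
    pvGroups mv l = pvRef mv l [] := by
  induction hn : l.length using Nat.strong_induction_on generalizing l with
  | _ n ih =>
  match l with
  | [] => simp [pvGroups, pvRef]
  | x :: xs =>
    rw [pvGroups]
    by_cases h : x = mv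
    · subst h
      have hpred : (fun t => ((t != x) == (x != x))) = (fun t : Int => t == x) := by
        funext t
        simp [bne]
      rw [if_neg (by simp), hpred]
      have hlen : ((x :: xs).dropWhile (fun t : Int => t == x)).length < n := by
        rw [← hn]
        simp only [List.dropWhile_cons, beq_self_eq_true, if_pos, ite_true]
        exact Nat.lt_succ_of_le (List.length_dropWhile_le _ _)
      rw [ih _ hlen _ rfl]
      exact ref_skip x (x :: xs)
    · have hx : (x != mv) = true := by simp [bne_iff_ne, h]
      have hpred : (fun t => ((t != mv) == (x != mv))) = (fun t : Int => t != mv) := by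
        funext t
        rw [hx]
        simp
      rw [if_pos h, hpred]
      rw [ref_absorb mv (x :: xs) [], List.nil_append]
      have htk : (x :: xs).takeWhile (fun t : Int => t != mv) =
          x :: xs.takeWhile (fun t : Int => t != mv) := by
        simp [List.takeWhile_cons, hx]
      have hlen : ((x :: xs).dropWhile (fun t : Int => t != mv)).length < n := by
        rw [← hn]
        simp only [List.dropWhile_cons, hx, if_pos, ite_true]
        exact Nat.lt_succ_of_le (List.length_dropWhile_le _ _)
      rw [ih _ hlen _ rfl]
      cases hd : (x :: xs).dropWhile (fun t : Int => t != mv) with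
      | nil =>
        rw [htk]
        simp [pvRef]
      | cons y ys =>
        have hy : y = mv := by
          have hne : (x :: xs).dropWhile (fun t : Int => t != mv) ≠ [] := by
            rw [hd]; exact List.cons_ne_nil _ _
          have hh := List.head_dropWhile_not (fun t : Int => t != mv) hne
          simp only [hd] at hh
          simpa using hh
        subst hy
        rw [htk]
        simp [pvRef]

-- ===== VERDICT (by name: the statement is the Claim_ definition above) =====
theorem extract_unmasked_chunks_spec : Claim_equal_extract_unmasked_chunks := by
  intro labels mv _
  unfold Spec_extract_unmasked_chunks extract_unmasked_chunks_alt
  rw [a_eq_ref, b_eq_ref]
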